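-- pv_equiv track=rewrite | github.com/AcharaChisomSolomon/MA_EURISKO_DSA_and_ML | hello_world/chapter_3/ex4.py | generate_recurse2_sequence
-- ===== SOURCE A (Python) =====
-- def generate_recurse2_sequence(n):
--     terms = [2, -3]
--
--     if n == 1:
--         return [2]
--     if n == 2:
--         return terms
--
--     while len(terms) < n:
--         prev_term_1 = terms[-1]
--         prev_term_2 = terms[-2]
--         next_term = prev_term_1 * prev_term_2
--         terms.append(next_term)
--
--     return terms
-- ===== SOURCE B (Python) =====
-- def generate_recurse2_sequence(n):
--     if n == 1:
--         return [2]
--     if n <= 2: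
--         return [2, -3]
--     seq = generate_recurse2_sequence(n - 1)
--     seq.append(seq[-1] * seq[-2])
--     return seq
-- ===== Notes on version B (the rewrite author's own statement) =====
-- stated objective: simpler
-- what changed: B replaces A's while-loop that grows the list until len reaches n by a direct recursion on n (a(n) is obtained by recursing for the first n-1 terms and appending the product of the last two), a shorter recursive decomposition of the same recurrence.
import Mathlib
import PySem

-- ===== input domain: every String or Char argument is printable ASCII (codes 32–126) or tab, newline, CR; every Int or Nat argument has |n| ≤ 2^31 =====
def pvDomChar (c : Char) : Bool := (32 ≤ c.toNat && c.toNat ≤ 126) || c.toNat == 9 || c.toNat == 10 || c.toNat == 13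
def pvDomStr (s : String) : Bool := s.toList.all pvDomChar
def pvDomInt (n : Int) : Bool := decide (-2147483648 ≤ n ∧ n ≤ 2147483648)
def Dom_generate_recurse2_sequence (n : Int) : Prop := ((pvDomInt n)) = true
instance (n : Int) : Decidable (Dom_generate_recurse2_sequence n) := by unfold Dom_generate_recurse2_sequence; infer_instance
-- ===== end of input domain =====

-- B replaces A's while-loop growing the list up to length n by a direct recursion on n
-- that appends the product of the last two terms (objective: simpler, same cost).


-- ===== PORT A =====
-- 'while len(terms) < n: append(terms[-1] * terms[-2])'; terms always has length ≥ 2,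
-- so pyGet? never returns none; .getD 0 only totalises.
def pvLoopA (n : Int) (terms : List Int) : List Int :=
  if _h : (terms.length : Int) < n then
    let p1 := (PySem.List.pyGet? terms (-1)).getD 0
    let p2 := (PySem.List.pyGet? terms (-2)).getD 0
    pvLoopA n (terms ++ [p1 * p2])
  else terms
termination_by (n - terms.length).toNat
decreasing_by simp; omega

def generate_recurse2_sequence (n : Int) : List Int :=
  if n = 1 then [2]
  else if n = 2 then [2, -3]
  else pvLoopA n [2, -3]

-- ===== PORT B =====
-- 'seq.append(seq[-1] * seq[-2])'
def pvStepB (seq : List Int) : List Int :=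
  seq ++ [(PySem.List.pyGet? seq (-1)).getD 0 * (PySem.List.pyGet? seq (-2)).getD 0]

def generate_recurse2_sequence_alt (n : Int) : List Int :=
  if n = 1 then [2]
  else if n ≤ 2 then [2, -3]
  else pvStepB (generate_recurse2_sequence_alt (n - 1))
termination_by n.toNat
decreasing_by simp; omega

-- ===== PRECONDITION & SPEC =====
def Spec_generate_recurse2_sequence (n : Int) (out : List Int) : Prop := out = generate_recurse2_sequence_alt n
instance (n : Int) (out : List Int) : Decidable (Spec_generate_recurse2_sequence n out) := by unfold Spec_generate_recurse2_sequence; infer_instance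

-- ===== CLAIM (what is proved, stated in full; the proofs are below) =====
def Claim_equal_generate_recurse2_sequence : Prop := ∀ (n : Int), Dom_generate_recurse2_sequence n → Spec_generate_recurse2_sequence n (generate_recurse2_sequence n)

-- ===== LEMMAS AND PROOFS =====

-- Unrolling the LAST iteration of A's loop: one more allowed length = one pvStepB after.
theorem pvLoopA_unroll (k : Nat) : ∀ (n : Int) (terms : List Int),
    (n - terms.length).toNat = k → (terms.length : Int) ≤ n →
    pvLoopA (n + 1) terms = pvStepB (pvLoopA n terms) := by
  induction k with
  | zero =>
    intro n terms hk hle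
    have hlen : (terms.length : Int) = n := by omega
    rw [pvLoopA, dif_pos (by omega), pvLoopA, dif_neg (by simp; omega),
        pvLoopA, dif_neg (by omega)]
    rfl
  | succ k ih =>
    intro n terms hk hle
    rw [pvLoopA, dif_pos (by omega)]
    conv_rhs => rw [pvLoopA, dif_pos (by omega)]
    exact ih n _ (by simp; omega) (by simp; omega)

theorem alt_eq_loop (m : Nat) : ∀ (n : Int), 2 ≤ n → (n - 2).toNat = m →
    generate_recurse2_sequence_alt n = pvLoopA n [2, -3] := by
  induction m with
  | zero =>
    intro n h2 hm
    have hn : n = 2 := by omega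
    subst hn
    rw [generate_recurse2_sequence_alt, pvLoopA]
    norm_num
  | succ m ih =>
    intro n h2 hm
    have h3 : 3 ≤ n := by omega
    rw [generate_recurse2_sequence_alt, if_neg (by omega), if_neg (by omega),
        ih (n - 1) (by omega) (by omega)]
    have h := pvLoopA_unroll ((n - 1) - 2).toNat (n - 1) [2, -3] rfl (by simp; omega)
    have hn1 : n - 1 + 1 = n := by ring
    rw [hn1] at h
    exact h.symm

-- ===== VERDICT (by name: the statement is the Claim_ definition above) =====
theorem generate_recurse2_sequence_spec : Claim_equal_generate_recurse2_sequence := by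
  unfold Claim_equal_generate_recurse2_sequence Spec_generate_recurse2_sequence
  intro n _
  unfold generate_recurse2_sequence
  by_cases h1 : n = 1
  · simp [h1, generate_recurse2_sequence_alt]
  by_cases h2 : n = 2
  · subst h2
    rw [generate_recurse2_sequence_alt]
    norm_num
  rw [if_neg h1, if_neg h2]
  by_cases hle : n ≤ 2
  · -- n < 2, n ≠ 1: A's loop never fires; B's n ≤ 2 branch.
    rw [pvLoopA, dif_neg (by simp; omega),
        generate_recurse2_sequence_alt, if_neg h1, if_pos hle]
  · exact (alt_eq_loop (n - 2).toNat n (by omega) rfl).symm
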